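-- pv_equiv track=rewrite | github.com/dkdltmais8/algorithm_study | 프로그래머스/LV3/공 이동 시뮬레이션.py | solution
-- ===== SOURCE A (Python) =====
-- def solution(n, m, y, x, queries):
--     sr = er = y
--     sc= ec = x
--     ans = 0
--     for i,v in queries[::-1]:
--         if i == 0:
--             if sc != 0:
--                 sc += v
--             ec += v
--             if ec > m-1:
--                 ec = m-1
--         elif i == 1:
--             sc -= v
--             if sc<0:
--                 sc = 0
--             if ec !=m-1:
--                 ec-=v
--         elif i == 2:
--             if sr != 0:
--                 sr += v
--             er += v
--             if er >n-1:
--                 er = n-1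
--         elif i == 3:
--             sr -= v
--             if sr<0:
--                 sr = 0
--             if er != n-1:
--                 er-=v
--         if sr>n-1 or er<0 or sc>m-1 or ec<0:
--             return ans
--     return (er-sr+1) * (ec-sc+1)
-- ===== SOURCE B (Python) =====
-- def _axis(size, start, grow, shrink, rev):
--     # reverse pass over one dimension: returns span length, or None once invalid
--     lo = hi = start
--     for i, v in rev:
--         if i == grow:
--             if lo != 0:
--                 lo += v
--             hi += v
--             if hi > size - 1:
--                 hi = size - 1
--         elif i == shrink:
--             lo -= v
--             if lo < 0:
--                 lo = 0
--             if hi != size - 1: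
--                 hi -= v
--         if lo > size - 1 or hi < 0:
--             return None
--     return hi - lo + 1
--
--
-- def solution(n, m, y, x, queries):
--     rev = queries[::-1]
--     rows = _axis(n, y, 2, 3, rev)
--     cols = _axis(m, x, 0, 1, rev)
--     if rows is None or cols is None:
--         return 0
--     return rows * cols
-- ===== Notes on version B (the rewrite author's own statement) =====
-- stated objective: alternative
-- what changed: A's single interleaved reverse loop over the joint 4-tuple state is replaced by one generic per-dimension reverse pass (invalidation reported as None) run once for rows and once for columns, with the two span lengths multiplied at the end.
import Mathlib
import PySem

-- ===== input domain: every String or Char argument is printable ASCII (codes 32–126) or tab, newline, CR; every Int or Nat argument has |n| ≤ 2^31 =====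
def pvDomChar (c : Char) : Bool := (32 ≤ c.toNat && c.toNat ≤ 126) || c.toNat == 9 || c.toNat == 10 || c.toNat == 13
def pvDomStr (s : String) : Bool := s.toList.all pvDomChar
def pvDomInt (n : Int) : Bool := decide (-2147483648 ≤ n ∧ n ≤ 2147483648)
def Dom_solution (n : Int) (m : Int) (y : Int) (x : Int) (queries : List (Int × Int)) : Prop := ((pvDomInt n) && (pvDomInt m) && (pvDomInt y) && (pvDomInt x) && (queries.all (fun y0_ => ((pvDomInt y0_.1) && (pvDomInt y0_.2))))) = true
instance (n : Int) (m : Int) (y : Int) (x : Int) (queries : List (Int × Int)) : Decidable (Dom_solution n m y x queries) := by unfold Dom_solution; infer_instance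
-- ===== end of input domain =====

-- B replaces A's single interleaved reverse loop by one generic per-dimension
-- reverse pass run twice (rows, then columns), multiplying the two span lengths;
-- objective: alternative decomposition (same cost), return value proved equal.

-- ===== PORT A =====
-- A's single reverse loop over the 4-tuple (sr, er, sc, ec), early return 0.
def solutionGo (n : Int) (m : Int) : List (Int × Int) → Int → Int → Int → Int → Int
  | [], sr, er, sc, ec => (er - sr + 1) * (ec - sc + 1)
  | (i, v) :: rest, sr, er, sc, ec =>
    let s : Int × Int × Int × Int :=
      if i = 0 then
        (sr, er, (if sc ≠ 0 then sc + v else sc), (if ec + v > m - 1 then m - 1 else ec + v))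
      else if i = 1 then
        let sc' := sc - v
        ((sr, er, (if sc' < 0 then 0 else sc'), (if ec ≠ m - 1 then ec - v else ec)) : Int × Int × Int × Int)
      else if i = 2 then
        ((if sr ≠ 0 then sr + v else sr), (if er + v > n - 1 then n - 1 else er + v), sc, ec)
      else if i = 3 then
        let sr' := sr - v
        (((if sr' < 0 then 0 else sr'), (if er ≠ n - 1 then er - v else er), sc, ec) : Int × Int × Int × Int)
      else (sr, er, sc, ec)
    if s.1 > n - 1 ∨ s.2.1 < 0 ∨ s.2.2.1 > m - 1 ∨ s.2.2.2 < 0 then 0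
    else solutionGo n m rest s.1 s.2.1 s.2.2.1 s.2.2.2

def solution (n : Int) (m : Int) (y : Int) (x : Int) (queries : List (Int × Int)) : Int :=
  solutionGo n m queries.reverse y y x x

-- ===== PORT B =====
-- B's generic one-dimension reverse pass: none = invalidated (A would return 0).
def axisGo (size : Int) (grow : Int) (shrink : Int) : List (Int × Int) → Int → Int → Option Int
  | [], lo, hi => some (hi - lo + 1)
  | (i, v) :: rest, lo, hi =>
    let p : Int × Int :=
      if i = grow then
        ((if lo ≠ 0 then lo + v else lo), (if hi + v > size - 1 then size - 1 else hi + v))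
      else if i = shrink then
        let lo' := lo - v
        (((if lo' < 0 then 0 else lo'), (if hi ≠ size - 1 then hi - v else hi)) : Int × Int)
      else (lo, hi)
    if p.1 > size - 1 ∨ p.2 < 0 then none
    else axisGo size grow shrink rest p.1 p.2

def solution_alt (n : Int) (m : Int) (y : Int) (x : Int) (queries : List (Int × Int)) : Int :=
  let rev := queries.reverse
  match axisGo n 2 3 rev y y, axisGo m 0 1 rev x x with
  | some r, some c => r * c
  | _, _ => 0

-- ===== PRECONDITION & SPEC =====
def Spec_solution (n : Int) (m : Int) (y : Int) (x : Int) (queries : List (Int × Int)) (out : Int) : Prop := out = solution_alt n m y x queries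
instance (n : Int) (m : Int) (y : Int) (x : Int) (queries : List (Int × Int)) (out : Int) : Decidable (Spec_solution n m y x queries out) := by unfold Spec_solution; infer_instance

-- ===== CLAIM (what is proved, stated in full; the proofs are below) =====
def Claim_equal_solution : Prop := ∀ (n : Int) (m : Int) (y : Int) (x : Int) (queries : List (Int × Int)), Dom_solution n m y x queries → Spec_solution n m y x queries (solution n m y x queries)

-- ===== LEMMAS AND PROOFS =====

def combine : Option Int → Option Int → Int
  | some r, some c => r * c
  | _, _ => 0

theorem combine_none_left (y : Option Int) : combine none y = 0 := by cases y <;> rfl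
theorem combine_none_right (x : Option Int) : combine x none = 0 := by cases x <;> rfl

theorem step_combine (A B C D : Prop) [Decidable A] [Decidable B] [Decidable C] [Decidable D]
    (X Y : Option Int) :
    (if A ∨ B ∨ C ∨ D then (0 : Int) else combine X Y)
      = combine (if A ∨ B then none else X) (if C ∨ D then none else Y) := by
  split_ifs with h h1 h2 <;>
    simp_all [combine_none_left, combine_none_right]

theorem go_eq (n m : Int) (l : List (Int × Int)) :
    ∀ sr er sc ec, solutionGo n m l sr er sc ec
      = combine (axisGo n 2 3 l sr er) (axisGo m 0 1 l sc ec) := by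
  induction l with
  | nil => intro sr er sc ec; rfl
  | cons q rest ih =>
    intro sr er sc ec
    obtain ⟨i, v⟩ := q
    by_cases h0 : i = 0
    · have h2 : ¬ i = 2 := by omega
      have h3 : ¬ i = 3 := by omega
      simp only [solutionGo, axisGo, if_pos h0, if_neg h2, if_neg h3]
      rw [ih, step_combine]
    · by_cases h1 : i = 1
      · have h2 : ¬ i = 2 := by omega
        have h3 : ¬ i = 3 := by omega
        simp only [solutionGo, axisGo, if_neg h0, if_pos h1, if_neg h2, if_neg h3]
        rw [ih, step_combine]
      · by_cases h2 : i = 2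
        · simp only [solutionGo, axisGo, if_neg h0, if_neg h1, if_pos h2]
          rw [ih, step_combine]
        · by_cases h3 : i = 3
          · simp only [solutionGo, axisGo, if_neg h0, if_neg h1, if_neg h2, if_pos h3]
            rw [ih, step_combine]
          · simp only [solutionGo, axisGo, if_neg h0, if_neg h1, if_neg h2, if_neg h3]
            rw [ih, step_combine]

theorem solution_eq_alt (n m y x : Int) (queries : List (Int × Int)) :
    solution n m y x queries = solution_alt n m y x queries := by
  show solutionGo n m queries.reverse y y x x = _
  rw [go_eq]
  unfold solution_alt combine
  rfl

-- ===== VERDICT (by name: the statement is the Claim_ definition above) =====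
theorem solution_spec : Claim_equal_solution := by
  intro n m y x queries _
  exact solution_eq_alt n m y x queries
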